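-- pv_equiv track=rewrite | github.com/flowstate-zone/flow_soldier | datasets/bases.py | get_imagedata_info
-- ===== SOURCE A (Python) =====
-- def get_imagedata_info(data):
--     pids, cams, tracks = [], [], []
--
--     for _, pid, camid, trackid in data:
--         pids += [pid]
--         cams += [camid]
--         tracks += [trackid]
--     pids = set(pids)
--     cams = set(cams)
--     tracks = set(tracks)
--     num_pids = len(pids)
--     num_cams = len(cams)
--     num_imgs = len(data)
--     num_views = len(tracks)
--     if len(data) > 0:
--         min_pid = min(pids)
--         max_pid = max(pids)
--         min_view = min(tracks)
--         max_view = max(tracks)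
--     else:
--         min_pid = max_pid = min_view = max_view = None
--
--     return (
--         num_pids,
--         num_imgs,
--         num_cams,
--         num_views,
--         min_pid,
--         max_pid,
--         min_view,
--         max_view,
--     )
-- ===== SOURCE B (Python) =====
-- def get_imagedata_info(data):
--     pids, cams, tracks = set(), set(), set()
--     min_pid = max_pid = min_view = max_view = None
--     for _, pid, camid, trackid in data:
--         if min_pid is None:
--             min_pid = max_pid = pid
--             min_view = max_view = trackid
--         else:
--             if pid < min_pid:
--                 min_pid = pid
--             if pid > max_pid:
--                 max_pid = pid
--             if trackid < min_view:
--                 min_view = trackid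
--             if trackid > max_view:
--                 max_view = trackid
--         pids.add(pid)
--         cams.add(camid)
--         tracks.add(trackid)
--     return (len(pids), len(data), len(cams), len(tracks),
--             min_pid, max_pid, min_view, max_view)
-- ===== Notes on version B (the rewrite author's own statement) =====
-- stated objective: alternative
-- what changed: B makes a single pass that updates running min/max of pid and trackid inline while building the three sets, eliminating A's intermediate lists and the four post-hoc min()/max() scans over the sets.
import Mathlib
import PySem

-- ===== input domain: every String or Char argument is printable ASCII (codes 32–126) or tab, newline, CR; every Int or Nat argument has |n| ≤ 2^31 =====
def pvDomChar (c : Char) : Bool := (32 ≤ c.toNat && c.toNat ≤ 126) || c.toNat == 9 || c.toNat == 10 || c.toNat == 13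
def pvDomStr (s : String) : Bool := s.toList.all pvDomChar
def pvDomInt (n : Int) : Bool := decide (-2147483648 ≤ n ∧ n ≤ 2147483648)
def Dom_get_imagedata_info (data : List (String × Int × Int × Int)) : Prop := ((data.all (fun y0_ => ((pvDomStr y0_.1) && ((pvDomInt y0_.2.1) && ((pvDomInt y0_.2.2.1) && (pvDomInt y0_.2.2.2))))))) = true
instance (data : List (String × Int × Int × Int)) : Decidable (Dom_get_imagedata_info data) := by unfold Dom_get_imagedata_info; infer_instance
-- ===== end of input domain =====

-- B builds the three sets and the running min/max of pid and trackid in one pass,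
-- instead of A's intermediate lists followed by four min()/max() scans (alternative decomposition, same O(n)).

-- ===== PORT A =====
def get_imagedata_info (data : List (String × Int × Int × Int)) : Int × Int × Int × Int × Option Int × Option Int × Option Int × Option Int :=
  let pidsL := data.foldl (fun acc y => acc ++ [y.2.1]) []
  let camsL := data.foldl (fun acc y => acc ++ [y.2.2.1]) []
  let tracksL := data.foldl (fun acc y => acc ++ [y.2.2.2]) []
  let pids : PySem.Set Int := PySem.Set.ofList pidsL
  let cams : PySem.Set Int := PySem.Set.ofList camsL
  let tracks : PySem.Set Int := PySem.Set.ofList tracksL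
  let num_pids : Int := PySem.Set.len pids
  let num_cams : Int := PySem.Set.len cams
  let num_imgs : Int := (data.length : Int)
  let num_views : Int := PySem.Set.len tracks
  if data.length > 0 then
    (num_pids, num_imgs, num_cams, num_views,
      PySem.List.min? pids (fun x => x), PySem.List.max? pids (fun x => x),
      PySem.List.min? tracks (fun x => x), PySem.List.max? tracks (fun x => x))
  else
    (num_pids, num_imgs, num_cams, num_views, none, none, none, none)

-- ===== PORT B =====
def altStep
    (st : PySem.Set Int × PySem.Set Int × PySem.Set Int × Option Int × Option Int × Option Int × Option Int)
    (y : String × Int × Int × Int) :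
    PySem.Set Int × PySem.Set Int × PySem.Set Int × Option Int × Option Int × Option Int × Option Int :=
  let pid := y.2.1
  let camid := y.2.2.1
  let trackid := y.2.2.2
  let (pids, cams, tracks, mp, xp, mv, xv) := st
  let (mp, xp, mv, xv) :=
    match mp, xp, mv, xv with
    | none, _, _, _ => (some pid, some pid, some trackid, some trackid)
    | some a, some b, some c, some d =>
        (some (if pid < a then pid else a), some (if pid > b then pid else b),
         some (if trackid < c then trackid else c), some (if trackid > d then trackid else d))
    | some a, _, _, _ => (some a, some pid, some trackid, some trackid)  -- unreachable: the four options are set together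
  (pids.add pid, cams.add camid, tracks.add trackid, mp, xp, mv, xv)

def get_imagedata_info_alt (data : List (String × Int × Int × Int)) : Int × Int × Int × Int × Option Int × Option Int × Option Int × Option Int :=
  let st := data.foldl altStep (PySem.Set.empty, PySem.Set.empty, PySem.Set.empty, none, none, none, none)
  (PySem.Set.len st.1, (data.length : Int), PySem.Set.len st.2.1, PySem.Set.len st.2.2.1,
   st.2.2.2.1, st.2.2.2.2.1, st.2.2.2.2.2.1, st.2.2.2.2.2.2)

-- ===== PRECONDITION & SPEC =====
def Spec_get_imagedata_info (data : List (String × Int × Int × Int)) (out : Int × Int × Int × Int × Option Int × Option Int × Option Int × Option Int) : Prop := out = get_imagedata_info_alt data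
instance (data : List (String × Int × Int × Int)) (out : Int × Int × Int × Int × Option Int × Option Int × Option Int × Option Int) : Decidable (Spec_get_imagedata_info data out) := by
  unfold Spec_get_imagedata_info
  haveI h1 : DecidableEq (Option Int × Option Int × Option Int × Option Int) := inferInstance
  infer_instance

-- ===== CLAIM (what is proved, stated in full; the proofs are below) =====
def Claim_equal_get_imagedata_info : Prop := ∀ (data : List (String × Int × Int × Int)), Dom_get_imagedata_info data → Spec_get_imagedata_info data (get_imagedata_info data)

-- ===== LEMMAS AND PROOFS =====

theorem foldl_append_map {α β : Type} (f : α → β) :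
    ∀ (l : List α) (s : List β), l.foldl (fun acc y => acc ++ [f y]) s = s ++ l.map f := by
  intro l
  induction l with
  | nil => intro s; simp
  | cons y t ih => intro s; simp [List.foldl, ih]

theorem min_if (a y : Int) : (if y < a then y else a) = min a y := by
  simp [min_def]; omega

theorem max_if (a y : Int) : (if y > a then y else a) = max a y := by
  simp [max_def]; omega

theorem altStep_fold_some :
    ∀ (l : List (String × Int × Int × Int)) (p c t : PySem.Set Int) (a b cc dd : Int),
    l.foldl altStep (p, c, t, some a, some b, some cc, some dd) =
      ((l.map (fun y => y.2.1)).foldl PySem.Set.add p,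
       (l.map (fun y => y.2.2.1)).foldl PySem.Set.add c,
       (l.map (fun y => y.2.2.2)).foldl PySem.Set.add t,
       some ((l.map (fun y => y.2.1)).foldl min a),
       some ((l.map (fun y => y.2.1)).foldl max b),
       some ((l.map (fun y => y.2.2.2)).foldl min cc),
       some ((l.map (fun y => y.2.2.2)).foldl max dd)) := by
  intro l
  induction l with
  | nil => intro p c t a b cc dd; rfl
  | cons y rest ih =>
      intro p c t a b cc dd
      simp only [List.foldl, List.map, altStep, min_if, max_if, ih]

theorem mem_min?_eq (l : List Int) (hne : l ≠ []) (m : Int)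
    (hm : m ∈ l) (hmin : ∀ x ∈ l, m ≤ x) :
    PySem.List.min? l (fun x => x) = some m := by
  cases hv : PySem.List.min? l (fun x => x) with
  | none => exact absurd ((PySem.List.min?_eq_none_iff _ _).mp hv) hne
  | some v =>
      have hvmem := PySem.List.min?_mem hv
      have h1 := PySem.List.min?_isMin hv m hm
      have h2 := hmin v hvmem
      simp only [le_antisymm h1 h2]

theorem mem_max?_eq (l : List Int) (hne : l ≠ []) (m : Int)
    (hm : m ∈ l) (hmax : ∀ x ∈ l, x ≤ m) :
    PySem.List.max? l (fun x => x) = some m := by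
  cases hv : PySem.List.max? l (fun x => x) with
  | none => exact absurd ((PySem.List.max?_eq_none_iff _ _).mp hv) hne
  | some v =>
      have hvmem := PySem.List.max?_mem hv
      have h1 := PySem.List.max?_isMax hv m hm
      have h2 := hmax v hvmem
      simp only [le_antisymm h2 h1]

theorem min?_ofList (l : List Int) :
    PySem.List.min? (PySem.Set.ofList l) (fun x => x) = PySem.List.min? l (fun x => x) := by
  cases l with
  | nil => rfl
  | cons x t =>
      rw [PySem.List.min?_id_cons]
      apply mem_min?_eq
      · intro h
        have : x ∈ PySem.Set.ofList (x :: t) := (PySem.Set.mem_ofList _ _).mpr (by simp)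
        simp [h] at this
      · refine (PySem.Set.mem_ofList _ _).mpr ?_
        rcases PySem.List.foldl_min_mem t x with h | h
        · rw [h]; exact List.mem_cons_self
        · exact List.mem_cons_of_mem _ h
      · intro z hz
        have hz' := (PySem.Set.mem_ofList _ _).mp hz
        rcases List.mem_cons.mp hz' with h | h
        · exact h ▸ (PySem.List.foldl_min_le t x).1
        · exact (PySem.List.foldl_min_le t x).2 z h

theorem max?_ofList (l : List Int) :
    PySem.List.max? (PySem.Set.ofList l) (fun x => x) = PySem.List.max? l (fun x => x) := by
  cases l with
  | nil => rfl
  | cons x t =>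
      rw [PySem.List.max?_id_cons]
      apply mem_max?_eq
      · intro h
        have : x ∈ PySem.Set.ofList (x :: t) := (PySem.Set.mem_ofList _ _).mpr (by simp)
        simp [h] at this
      · refine (PySem.Set.mem_ofList _ _).mpr ?_
        rcases PySem.List.foldl_max_mem t x with h | h
        · rw [h]; exact List.mem_cons_self
        · exact List.mem_cons_of_mem _ h
      · intro z hz
        have hz' := (PySem.Set.mem_ofList _ _).mp hz
        rcases List.mem_cons.mp hz' with h | h
        · exact h ▸ (PySem.List.le_foldl_max t x).1
        · exact (PySem.List.le_foldl_max t x).2 z h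

theorem setFold_cons (x : Int) (t : List Int) :
    t.foldl PySem.Set.add (PySem.Set.add PySem.Set.empty x) = PySem.Set.ofList (x :: t) := by
  rw [PySem.Set.ofList_eq_foldl]; rfl

-- ===== VERDICT (by name: the statement is the Claim_ definition above) =====
theorem get_imagedata_info_spec : Claim_equal_get_imagedata_info := by
  intro data _
  unfold Spec_get_imagedata_info get_imagedata_info get_imagedata_info_alt
  cases data with
  | nil => rfl
  | cons y rest =>
      simp only [List.foldl, foldl_append_map, List.nil_append, altStep]
      rw [altStep_fold_some]
      simp only [setFold_cons, min?_ofList, max?_ofList, List.singleton_append,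
        List.length_cons, gt_iff_lt, Nat.succ_pos, if_pos, Prod.mk.injEq]
      and_intros <;> first
        | trivial
        | exact PySem.List.min?_id_cons _ _
        | exact PySem.List.max?_id_cons _ _
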